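-- pv_equiv track=rewrite | github.com/zackeua/AdventOfCode | 2023/dag3/3_2.py | search_right
-- ===== SOURCE A (Python) =====
-- def is_num(c):
--     return c in '0123456789'
--
-- def search_right(row, col, grid, start=0):
--     total = start
--
--     for i, elem in enumerate(grid[row][col+1:]):
--         if is_num(elem):
--             total *= 10
--             total += int(elem)
--             #grid[row][col+i+1] = '_'
--         else:
--             break
--     return total
-- ===== SOURCE B (Python) =====
-- def is_num(c):
--     return c in '0123456789'
--
-- def search_right(row, col, grid, start=0):
--     tail = grid[row][col+1:]
--     k = 0
--     while k < len(tail) and is_num(tail[k]):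
--         k += 1
--     return start * 10**k + sum(int(e) * 10**(k - 1 - i) for i, e in enumerate(tail[:k]))
-- ===== Notes on version B (the rewrite author's own statement) =====
-- stated objective: alternative
-- what changed: B first measures the length k of the leading digit run of grid[row][col+1:], then returns the result in closed form start*10**k + sum(int(e)*10**(k-1-i)), instead of A's fused digit-by-digit accumulator with an early break.
import Mathlib
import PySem

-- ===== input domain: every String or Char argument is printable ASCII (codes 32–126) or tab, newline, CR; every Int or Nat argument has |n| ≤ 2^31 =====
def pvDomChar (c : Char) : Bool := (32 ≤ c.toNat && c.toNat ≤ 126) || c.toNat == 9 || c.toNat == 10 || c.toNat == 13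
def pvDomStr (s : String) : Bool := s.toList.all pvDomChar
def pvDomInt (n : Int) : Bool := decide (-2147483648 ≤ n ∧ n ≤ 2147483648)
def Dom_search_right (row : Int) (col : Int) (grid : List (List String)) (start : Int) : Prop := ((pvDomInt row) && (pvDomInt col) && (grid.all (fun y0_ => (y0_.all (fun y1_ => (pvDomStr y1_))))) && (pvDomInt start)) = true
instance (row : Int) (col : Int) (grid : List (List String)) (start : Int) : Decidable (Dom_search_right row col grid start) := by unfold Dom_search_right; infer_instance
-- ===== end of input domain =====

-- B computes the leading digit-run length first and returns a closed-form sum of place values,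
-- instead of A's fused accumulator loop with an early break (objective: alternative decomposition).

-- is_num(c) = c in '0123456789'  (Python substring test; shared helper of both sources)
def pyIsNum (c : String) : Bool := PySem.Str.isIn c "0123456789"

-- ===== PORT A =====
-- the for-loop of A: early break on a non-digit element; int(elem) via ofStr? (Pre_ excludes its ValueError)
def searchRightLoop : List String → Int → Int
  | [], total => total
  | e :: es, total =>
    if pyIsNum e then searchRightLoop es (total * 10 + (PySem.Int.ofStr? e).getD 0)
    else total

def search_right (row : Int) (col : Int) (grid : List (List String)) (start : Int) : Int :=
  -- grid[row] (Pre_ excludes the IndexError), then [col+1:]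
  searchRightLoop (PySem.List.slice ((PySem.List.pyGet? grid row).getD []) (some (col + 1)) none) start

-- ===== PORT B =====
-- the while-loop of Source B counting the leading digit run
def altRunLen : List String → Nat
  | [] => 0
  | e :: es => if pyIsNum e then altRunLen es + 1 else 0

-- sum(int(e) * 10**(k - 1 - i) for i, e in enumerate(prefix))
def altSum (pre : List String) (k : Nat) : Int :=
  ((PySem.List.enumerate pre 0).map
    (fun ie => (PySem.Int.ofStr? ie.2).getD 0 * 10 ^ (((k : Int) - 1 - ie.1).toNat))).sum

def search_right_alt (row : Int) (col : Int) (grid : List (List String)) (start : Int) : Int :=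
  let tail := PySem.List.slice ((PySem.List.pyGet? grid row).getD []) (some (col + 1)) none
  let k := altRunLen tail
  start * 10 ^ k + altSum (tail.take k) k

-- ===== PRECONDITION & SPEC =====
-- Pre_ excludes exactly the inputs where Python A raises: row out of range (IndexError), or an
-- empty-string element inside the leading digit run (is_num('') is True, so int('') raises ValueError).
def Pre_search_right (row : Int) (col : Int) (grid : List (List String)) (start : Int) : Prop :=
  PySem.Raise.InRange grid.length row ∧
  "" ∉ (PySem.List.slice ((PySem.List.pyGet? grid row).getD []) (some (col + 1)) none).takeWhile pyIsNum
instance (row : Int) (col : Int) (grid : List (List String)) (start : Int) : Decidable (Pre_search_right row col grid start) := by unfold Pre_search_right; infer_instance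

def pvWitness_search_right : Int × Int × List (List String) × Int := (0, 0, [["#", "1", "2", "x"]], 5)

def Spec_search_right (row : Int) (col : Int) (grid : List (List String)) (start : Int) (out : Int) : Prop := out = search_right_alt row col grid start
instance (row : Int) (col : Int) (grid : List (List String)) (start : Int) (out : Int) : Decidable (Spec_search_right row col grid start out) := by unfold Spec_search_right; infer_instance

-- ===== CLAIM (what is proved, stated in full; the proofs are below) =====
def Claim_equal_search_right : Prop := ∀ (row : Int) (col : Int) (grid : List (List String)) (start : Int), Dom_search_right row col grid start → Pre_search_right row col grid start → Spec_search_right row col grid start (search_right row col grid start)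

-- ===== LEMMAS AND PROOFS =====

theorem enumerate_shift (pre : List String) (s : Int) :
    PySem.List.enumerate pre (s + 1) =
      (PySem.List.enumerate pre s).map (fun ie => (ie.1 + 1, ie.2)) := by
  induction pre generalizing s with
  | nil => simp [PySem.List.enumerate_nil]
  | cons e es ih => simp [PySem.List.enumerate_cons, ih (s + 1)]

theorem altSum_cons (e : String) (pre : List String) (k : Nat) :
    altSum (e :: pre) (k + 1) = (PySem.Int.ofStr? e).getD 0 * 10 ^ k + altSum pre k := by
  have hsh := enumerate_shift pre 0
  norm_num at hsh
  unfold altSum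
  rw [PySem.List.enumerate_cons, show (0 : Int) + 1 = 1 from by norm_num, hsh]
  simp only [List.map_cons, List.sum_cons, List.map_map]
  congr 1
  · have h1 : (((k + 1 : Nat) : Int) - 1 - 0).toNat = k := by push_cast; omega
    rw [h1]
  · congr 1
    apply List.map_congr_left
    intro ie _
    simp only [Function.comp]
    congr 2
    push_cast
    omega

theorem loop_eq (tail : List String) (total : Int) :
    searchRightLoop tail total =
      total * 10 ^ altRunLen tail + altSum (tail.take (altRunLen tail)) (altRunLen tail) := by
  induction tail generalizing total with
  | nil => simp [searchRightLoop, altRunLen, altSum, PySem.List.enumerate_nil]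
  | cons e es ih =>
    by_cases h : pyIsNum e
    · simp only [searchRightLoop, altRunLen, h, if_true]
      rw [ih, List.take_succ_cons, altSum_cons]
      ring
    · simp [searchRightLoop, altRunLen, h, altSum, PySem.List.enumerate_nil]

-- ===== VERDICT (by name: the statement is the Claim_ definition above) =====
theorem search_right_spec : Claim_equal_search_right := by
  intro row col grid start _ _
  unfold Spec_search_right search_right search_right_alt
  exact loop_eq _ _
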